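-- pv_equiv track=rewrite | github.com/slidracoon72/leetcode | Solutions/FindConsistentLogs.py | findConsistentLogs
-- ===== SOURCE A (Python) =====
-- from collections import defaultdict
--
-- def findConsistentLogs(userEvent):
--     # Step 1: Calculate the frequency of each user in the entire array
--     total_freq = defaultdict(int)
--     for user in userEvent:
--         total_freq[user] += 1
--
--     # Step 2: Find the minimum frequency of any user
--     min_freq = min(total_freq.values())
--
--     # Step 3: Initialize variables for sliding window approach
--     max_length = 0
--     current_freq = defaultdict(int)
--     l = 0
--
--     # Traverse the array with the right pointer
--     for r in range(len(userEvent)):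
--         current_freq[userEvent[r]] += 1
--
--         # Adjust the left pointer to ensure the subarray is valid
--         while True:
--             max_freq_in_window = max(current_freq.values(), default=0)
--
--             if max_freq_in_window == min_freq:
--                 # Update max length if the current window is valid
--                 max_length = max(max_length, r - l + 1)
--                 break
--             elif max_freq_in_window < min_freq:
--                 # Extend the window to the right
--                 break
--             else:
--                 # Remove the leftmost element and adjust frequency counts
--                 current_freq[userEvent[l]] -= 1
--                 if current_freq[userEvent[l]] == 0:
--                     del current_freq[userEvent[l]]
--                 l += 1
--
--     return max_length
-- ===== SOURCE B (Python) =====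
-- def findConsistentLogs(userEvent):
--     # One-pass sliding window: no max() scan over the counter; instead track
--     # `at_min` = number of distinct users whose window count equals min_freq,
--     # and shrink only while the just-added user's count exceeds min_freq.
--     total = {}
--     for user in userEvent:
--         total[user] = total.get(user, 0) + 1
--     min_freq = min(total.values())
--
--     cnt = {}
--     at_min = 0
--     best = 0
--     l = 0
--     for r in range(len(userEvent)):
--         x = userEvent[r]
--         c = cnt.get(x, 0) + 1
--         cnt[x] = c
--         if c == min_freq:
--             at_min += 1
--         elif c == min_freq + 1:
--             at_min -= 1
--         while c > min_freq:
--             y = userEvent[l]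
--             l += 1
--             d = cnt.get(y, 0) - 1
--             if d == 0:
--                 del cnt[y]
--             else:
--                 cnt[y] = d
--             if d == min_freq:
--                 at_min += 1
--             elif d == min_freq - 1:
--                 at_min -= 1
--             c = cnt.get(x, 0)
--         if at_min > 0:
--             best = max(best, r - l + 1)
--     return best
-- ===== Notes on version B (the rewrite author's own statement) =====
-- stated objective: faster
-- what changed: A recomputes max(current_freq.values()) with a full scan of the counter on every iteration of the inner while-loop; B maintains in O(1) per element a counter at_min of distinct users whose window count equals min_freq and shrinks while the just-added user's count exceeds min_freq, so the inner scan disappears.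
-- outside the precondition, e.g. on findConsistentLogs([]): A raises ValueError, B raises ValueError
import Mathlib
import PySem

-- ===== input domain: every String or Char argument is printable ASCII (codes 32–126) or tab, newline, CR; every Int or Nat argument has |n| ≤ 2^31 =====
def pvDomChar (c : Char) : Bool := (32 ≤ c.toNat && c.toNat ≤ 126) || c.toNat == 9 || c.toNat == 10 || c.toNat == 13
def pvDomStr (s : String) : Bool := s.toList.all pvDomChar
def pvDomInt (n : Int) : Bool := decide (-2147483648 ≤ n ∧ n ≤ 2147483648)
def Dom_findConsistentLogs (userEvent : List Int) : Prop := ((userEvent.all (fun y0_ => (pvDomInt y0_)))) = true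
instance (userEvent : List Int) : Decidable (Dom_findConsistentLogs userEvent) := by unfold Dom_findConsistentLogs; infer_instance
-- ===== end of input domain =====

-- B replaces A's per-step max() scan over the window counter by an O(1) update of
-- `at_min` (number of distinct users whose window count equals min_freq) and shrinks
-- while the just-added user's count exceeds min_freq; measurably faster (one pass, no inner scan).

-- ===== PORT A =====
-- inner `while True:` loop of A; `none` = the IndexError userEvent[l] would raise
-- (never reached on Pre_ inputs) or exhausted fuel (the caller passes enough).
def aInner (xs : List Int) (m r : Int) :
    Nat → PySem.Dict Int Int → Int → Int → Option (PySem.Dict Int Int × Int × Int)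
  | 0, _, _, _ => none
  | fuel+1, freq, l, maxLen =>
    let mx := PySem.List.maxD freq.values (fun v => v) 0
    if mx = m then some (freq, l, max maxLen (r - l + 1))
    else if mx < m then some (freq, l, maxLen)
    else
      match PySem.List.pyGet? xs l with
      | none => none
      | some y =>
        let f1 := (freq.modify y 0 (· - 1))
        let f2 := if f1.getD y 0 = 0 then f1.erase y else f1
        aInner xs m r fuel f2 (l + 1) maxLen

def aOuter (xs : List Int) (m : Int) : Option (PySem.Dict Int Int × Int × Int) :=
  (PySem.List.pyRange 0 (PySem.List.len xs) 1).foldl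
    (fun st r =>
      match st with
      | none => none
      | some (freq, l, maxLen) =>
        match PySem.List.pyGet? xs r with
        | none => none
        | some u => aInner xs m r (r.toNat + 2) (freq.modify u 0 (· + 1)) l maxLen)
    (some (PySem.Dict.empty, 0, 0))

def findConsistentLogs (userEvent : List Int) : Int :=
  let totalFreq := userEvent.foldl (fun d u => d.modify u 0 (· + 1)) PySem.Dict.empty
  match PySem.List.min? totalFreq.values (fun v => v) with
  | none => 0   -- min() of an empty sequence raises ValueError; excluded by Pre_
  | some minFreq =>
    match aOuter userEvent minFreq with
    | none => 0
    | some (_, _, maxLen) => maxLen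

-- ===== PORT B =====
-- inner `while c > min_freq:` loop of B; state (cnt, at_min, l, c); `none` as in aInner.
def bInner (xs : List Int) (m x : Int) :
    Nat → PySem.Dict Int Int → Int → Int → Int → Option (PySem.Dict Int Int × Int × Int × Int)
  | 0, _, _, _, _ => none
  | fuel+1, cnt, atMin, l, c =>
    if m < c then
      match PySem.List.pyGet? xs l with
      | none => none
      | some y =>
        let d := cnt.getD y 0 - 1
        let cnt1 := if d = 0 then cnt.erase y else cnt.insert y d
        let atMin1 := if d = m then atMin + 1 else if d = m - 1 then atMin - 1 else atMin
        bInner xs m x fuel cnt1 atMin1 (l + 1) (cnt1.getD x 0)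
    else some (cnt, atMin, l, c)

def bOuter (xs : List Int) (m : Int) : Option (PySem.Dict Int Int × Int × Int × Int) :=
  (PySem.List.pyRange 0 (PySem.List.len xs) 1).foldl
    (fun st r =>
      match st with
      | none => none
      | some (cnt, atMin, best, l) =>
        match PySem.List.pyGet? xs r with
        | none => none
        | some x =>
          let c := cnt.getD x 0 + 1
          let cnt1 := cnt.insert x c
          let atMin1 := if c = m then atMin + 1
                        else if c = m + 1 then atMin - 1 else atMin
          match bInner xs m x (r.toNat + 2) cnt1 atMin1 l c with
          | none => none
          | some (cnt2, atMin2, l2, _) =>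
            some (cnt2, atMin2, if 0 < atMin2 then max best (r - l2 + 1) else best, l2))
    (some (PySem.Dict.empty, 0, 0, 0))

def findConsistentLogs_alt (userEvent : List Int) : Int :=
  let total := userEvent.foldl (fun d u => d.insert u (d.getD u 0 + 1)) PySem.Dict.empty
  match PySem.List.min? total.values (fun v => v) with
  | none => 0   -- min() of an empty sequence raises ValueError; excluded by Pre_
  | some minFreq =>
    match bOuter userEvent minFreq with
    | none => 0
    | some (_, _, best, _) => best

-- ===== PRECONDITION & SPEC =====
-- Pre_ excludes only the empty list, on which A (and B) raise ValueError at min().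
def Pre_findConsistentLogs (userEvent : List Int) : Prop := userEvent ≠ []
instance (userEvent : List Int) : Decidable (Pre_findConsistentLogs userEvent) := by
  unfold Pre_findConsistentLogs; infer_instance

def pvWitness_findConsistentLogs : List Int := [1, 2, 2, 1, 3]

def Spec_findConsistentLogs (userEvent : List Int) (out : Int) : Prop := out = findConsistentLogs_alt userEvent
instance (userEvent : List Int) (out : Int) : Decidable (Spec_findConsistentLogs userEvent out) := by unfold Spec_findConsistentLogs; infer_instance

-- ===== CLAIM (what is proved, stated in full; the proofs are below) =====
def Claim_equal_findConsistentLogs : Prop := ∀ (userEvent : List Int), Dom_findConsistentLogs userEvent → Pre_findConsistentLogs userEvent → Spec_findConsistentLogs userEvent (findConsistentLogs userEvent)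

-- ===== LEMMAS AND PROOFS =====

theorem dict_get?_erase (d : PySem.Dict Int Int) (k k' : Int) :
    (d.erase k).get? k' = if k' = k then none else d.get? k' := by
  rcases d with ⟨L⟩
  simp only [PySem.Dict.erase, PySem.Dict.get?]
  by_cases hk : k' = k
  · subst hk
    simp only []
    rw [List.find?_eq_none.2]
    · rfl
    · intro p hp
      have := (List.mem_filter.1 hp).2
      simpa using this
  · simp only [if_neg hk]
    congr 1
    induction L with
    | nil => rfl
    | cons a L ih =>
      by_cases hak : a.1 = k
      · have h1 : (a.1 == k) = true := by simpa using hak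
        have h2 : (a.1 == k') = false := by simp [hak, Ne.symm hk]
        simp [h1, h2, ih]
      · have h1 : (a.1 == k) = false := by simpa using hak
        by_cases hak' : a.1 = k'
        · have h2 : (a.1 == k') = true := by simpa using hak'
          simp [h1, h2]
        · have h2 : (a.1 == k') = false := by simpa using hak'
          simp [h1, h2, ih]

theorem dict_keys_erase (d : PySem.Dict Int Int) (k : Int) :
    (d.erase k).keys = d.keys.filter (fun a => !(a == k)) := by
  rcases d with ⟨L⟩
  simp only [PySem.Dict.erase, PySem.Dict.keys, List.filter_map]
  rfl

theorem dict_getD_erase (d : PySem.Dict Int Int) (k k' : Int) :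
    (d.erase k).getD k' 0 = if k' = k then 0 else d.getD k' 0 := by
  simp only [PySem.Dict.getD, dict_get?_erase]
  split_ifs <;> rfl

theorem dict_nodup_keys_erase (d : PySem.Dict Int Int) (k : Int)
    (h : d.keys.Nodup) : (d.erase k).keys.Nodup := by
  rw [dict_keys_erase]
  exact h.filter _

theorem dict_erase_insert_self (d : PySem.Dict Int Int) (k : Int) (v : Int) :
    (d.insert k v).erase k = d.erase k := by
  rcases d with ⟨L⟩
  simp only [PySem.Dict.insert, PySem.Dict.erase]
  by_cases hc : (PySem.Dict.mk L).contains k = true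
  · simp only [hc, if_pos]
    congr 1
    clear hc
    induction L with
    | nil => rfl
    | cons a L ih =>
      by_cases hak : a.1 = k
      · simp only [List.map_cons, List.filter_cons]
        simp [hak]
        simpa using ih
      · simp only [List.map_cons, List.filter_cons]
        simp [hak]
        simpa using ih
  · simp only [hc]
    simp

theorem dict_get?_mem_values (d : PySem.Dict Int Int) {k v : Int}
    (h : d.get? k = some v) : v ∈ d.values := by
  have := PySem.Dict.mem_items_of_get?_eq_some d h
  exact List.mem_map.2 ⟨(k, v), this, rfl⟩

-- number of distinct keys whose stored count equals m
def numEq (m : Int) (d : PySem.Dict Int Int) : Int :=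
  ((d.keys.countP (fun k => d.getD k 0 = m) : Nat) : Int)

theorem countP_update_int (p q : Int → Bool) :
    ∀ (L : List Int), L.Nodup → ∀ y ∈ L, (∀ z ∈ L, z ≠ y → q z = p z) →
    ((L.countP q : Nat) : Int) =
      (L.countP p : Nat) + (if q y then 1 else 0) - (if p y then 1 else 0) := by
  intro L
  induction L with
  | nil => intro _ y hy; simp at hy
  | cons a L ih =>
    intro hnd y hy hagree
    rcases List.mem_cons.1 hy with rfl | hyL
    · have hyn : y ∉ L := (List.nodup_cons.1 hnd).1
      have : L.countP q = L.countP p := by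
        apply List.countP_congr
        intro z hz
        rw [hagree z (List.mem_cons_of_mem _ hz) (by rintro rfl; exact hyn hz)]
      rw [List.countP_cons, List.countP_cons, this]
      push_cast
      split_ifs <;> omega
    · have ha : a ≠ y := by rintro rfl; exact (List.nodup_cons.1 hnd).1 hyL
      have hqa : q a = p a := hagree a List.mem_cons_self ha
      have := ih (List.nodup_cons.1 hnd).2 y hyL
        (fun z hz hne => hagree z (List.mem_cons_of_mem _ hz) hne)
      rw [List.countP_cons, List.countP_cons, hqa]
      push_cast at this ⊢
      split_ifs at this ⊢ <;> omega

theorem countP_filter_ne_int (p : Int → Bool) (y : Int) :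
    ∀ L : List Int, L.Nodup →
    (((L.filter (fun a => !(a == y))).countP p : Nat) : Int) =
      (L.countP p : Nat) - (if y ∈ L ∧ p y = true then 1 else 0) := by
  intro L
  induction L with
  | nil => intro _; simp
  | cons a L ih =>
    intro hnd
    by_cases hay : a = y
    · subst hay
      have hyn : a ∉ L := (List.nodup_cons.1 hnd).1
      have hf : List.filter (fun b => !(b == a)) L = L :=
        List.filter_eq_self.2 (fun b hb => by
          simp only [Bool.not_eq_eq_eq_not, Bool.not_true, beq_eq_false_iff_ne, ne_eq]
          rintro rfl; exact hyn hb)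
      have hfc : List.filter (fun b => !(b == a)) (a :: L) = L := by
        rw [List.filter_cons]; simp [hf]
      rw [hfc, List.countP_cons]
      have hmem : a ∈ a :: L := List.mem_cons_self
      simp only [hmem, true_and]
      split_ifs with h <;> push_cast <;> simp [h] <;> omega
    · have h1 : (a == y) = false := by simpa using hay
      have := ih (List.nodup_cons.1 hnd).2
      have hfc : List.filter (fun b => !(b == y)) (a :: L) = a :: List.filter (fun b => !(b == y)) L := by
        rw [List.filter_cons]; simp [h1]
      have hm : (y ∈ a :: L) ↔ y ∈ L := by
        constructor
        · intro h; rcases List.mem_cons.1 h with rfl | h; exact absurd rfl hay; exact h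
        · exact List.mem_cons_of_mem a
      rw [hfc, List.countP_cons, List.countP_cons, if_congr (and_congr_left' hm) rfl rfl]
      push_cast at this ⊢
      split_ifs at this ⊢ <;> omega

theorem numEq_insert (m : Int) (hm : m ≠ 0) (d : PySem.Dict Int Int)
    (hnd : d.keys.Nodup) (y v : Int) :
    numEq m (d.insert y v) =
      numEq m d + (if v = m then 1 else 0) - (if d.getD y 0 = m then 1 else 0) := by
  unfold numEq
  by_cases hc : d.contains y = true
  · have hy : y ∈ d.keys := (PySem.Dict.contains_iff_mem_keys d y).1 hc
    rw [PySem.Dict.keys_insert_of_contains d v hc]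
    have h := countP_update_int (fun k => decide (d.getD k 0 = m))
      (fun k => decide ((d.insert y v).getD k 0 = m)) d.keys hnd y hy
      (fun z _ hz => by simp [PySem.Dict.getD_insert_of_ne d v 0 hz])
    rw [h]
    have h1 : (d.insert y v).getD y 0 = v := PySem.Dict.getD_insert_self d y v 0
    simp only [h1]
    split_ifs <;> simp_all
  · have hc' : d.contains y = false := by simpa using hc
    rw [PySem.Dict.keys_insert_of_not_contains d v hc']
    have hyn : y ∉ d.keys := fun h => by
      rw [(PySem.Dict.contains_iff_mem_keys d y).2 h] at hc'; exact absurd hc' (by simp)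
    have hagree : d.keys.countP (fun k => decide ((d.insert y v).getD k 0 = m))
        = d.keys.countP (fun k => decide (d.getD k 0 = m)) := by
      apply List.countP_congr
      intro z hz
      have hzy : z ≠ y := fun h => hyn (h ▸ hz)
      simp [PySem.Dict.getD_insert_of_ne d v 0 hzy]
    rw [List.countP_append, hagree]
    have h1 : (d.insert y v).getD y 0 = v := PySem.Dict.getD_insert_self d y v 0
    have h0 : d.getD y 0 = 0 := PySem.Dict.getD_of_not_contains d 0 hc'
    simp only [List.countP_cons, List.countP_nil, h1, h0]
    have : ¬ ((0:Int) = m) := fun h => hm h.symm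
    push_cast
    split_ifs <;> simp_all <;> omega

theorem numEq_erase (m : Int) (hm : m ≠ 0) (d : PySem.Dict Int Int)
    (hnd : d.keys.Nodup) (y : Int) :
    numEq m (d.erase y) = numEq m d - (if d.getD y 0 = m then 1 else 0) := by
  have dict_getD_erase : ∀ k', k' ≠ y → (d.erase y).getD k' 0 = d.getD k' 0 := by
    intro k' h
    rw [_root_.dict_getD_erase d y k', if_neg h]
  unfold numEq
  rw [dict_keys_erase d y]
  have hagree : (d.keys.filter (fun a => !(a == y))).countP
        (fun k => decide ((d.erase y).getD k 0 = m))
      = (d.keys.filter (fun a => !(a == y))).countP (fun k => decide (d.getD k 0 = m)) := by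
    apply List.countP_congr
    intro z hz
    have hzy : z ≠ y := by
      have := (List.mem_filter.1 hz).2
      simpa using this
    simp [dict_getD_erase z hzy]
  rw [hagree, countP_filter_ne_int _ y d.keys hnd]
  by_cases hy : y ∈ d.keys
  · simp [hy]
  · have hc' : d.contains y = false := by
      rcases h : d.contains y; rfl
      exact absurd ((PySem.Dict.contains_iff_mem_keys d y).1 h) hy
    have h0 : d.getD y 0 = 0 := PySem.Dict.getD_of_not_contains d 0 hc'
    rw [h0]
    have : ¬ ((0:Int) = m) := fun h => hm h.symm
    simp [hy, this]

theorem numEq_pos_iff (m : Int) (d : PySem.Dict Int Int) :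
    0 < numEq m d ↔ ∃ k ∈ d.keys, d.getD k 0 = m := by
  unfold numEq
  rw [Int.natCast_pos, List.countP_pos_iff]
  simp

-- MAIN PROOFS BELOW
-- values of a dict with Nodup keys, via getD
theorem mem_values_getD (freq : PySem.Dict Int Int) (hnd : freq.keys.Nodup) {v : Int}
    (hv : v ∈ freq.values) : ∃ k ∈ freq.keys, freq.getD k 0 = v := by
  rw [PySem.Dict.values_eq_map_keys freq hnd 0] at hv
  rcases List.mem_map.1 hv with ⟨k, hk, hkv⟩
  exact ⟨k, hk, hkv⟩

theorem getD_zero_or_mem_values (freq : PySem.Dict Int Int) (x : Int) :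
    freq.getD x 0 = 0 ∨ freq.getD x 0 ∈ freq.values := by
  rcases h : freq.get? x with _ | v
  · left; rw [PySem.Dict.getD, h]; rfl
  · right; rw [PySem.Dict.getD, h]; exact dict_get?_mem_values freq h

-- the two inner loops run in lockstep
theorem inner_lockstep (xs : List Int) (m x r : Int) (hm : 0 < m) :
    ∀ (fuel : Nat) (freq : PySem.Dict Int Int) (l maxLen atMin c : Int),
    freq.keys.Nodup → atMin = numEq m freq → c = freq.getD x 0 →
    (∀ k, k ≠ x → freq.getD k 0 ≤ m) →
    (aInner xs m r fuel freq l maxLen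
      = (bInner xs m x fuel freq atMin l c).map
          (fun s => (s.1, s.2.2.1, if 0 < s.2.1 then max maxLen (r - s.2.2.1 + 1) else maxLen)))
    ∧ (∀ s, bInner xs m x fuel freq atMin l c = some s →
        s.1.keys.Nodup ∧ s.2.1 = numEq m s.1 ∧ (∀ k, s.1.getD k 0 ≤ m)) := by
  intro fuel
  induction fuel with
  | zero =>
    intro freq l maxLen atMin c _ _ _ _
    exact ⟨rfl, by intro s h; simp [bInner] at h⟩
  | succ fuel ih =>
    intro freq l maxLen atMin c hnd ha hc hko
    have hstepA : aInner xs m r (fuel+1) freq l maxLen =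
        (if PySem.List.maxD freq.values (fun v => v) 0 = m then
          some (freq, l, max maxLen (r - l + 1))
         else if PySem.List.maxD freq.values (fun v => v) 0 < m then some (freq, l, maxLen)
         else match PySem.List.pyGet? xs l with
              | none => none
              | some y =>
                aInner xs m r fuel
                  (if (freq.modify y 0 (· - 1)).getD y 0 = 0
                   then (freq.modify y 0 (· - 1)).erase y else (freq.modify y 0 (· - 1)))
                  (l + 1) maxLen) := rfl
    have hstepB : bInner xs m x (fuel+1) freq atMin l c =
        (if m < c then
          match PySem.List.pyGet? xs l with
          | none => none
          | some y =>
            bInner xs m x fuel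
              (if freq.getD y 0 - 1 = 0 then freq.erase y
               else freq.insert y (freq.getD y 0 - 1))
              (if freq.getD y 0 - 1 = m then atMin + 1
               else if freq.getD y 0 - 1 = m - 1 then atMin - 1 else atMin)
              (l + 1)
              ((if freq.getD y 0 - 1 = 0 then freq.erase y
                else freq.insert y (freq.getD y 0 - 1)).getD x 0)
         else some (freq, atMin, l, c)) := rfl
    have hub : ∀ v ∈ freq.values, v ≤ PySem.List.maxD freq.values (fun v => v) 0 := by
      intro v hv
      have hne : freq.values ≠ [] := by rintro h; rw [h] at hv; simp at hv
      exact PySem.List.max?_isMax (PySem.List.max?_eq_some_maxD freq.values (fun v => v) 0 hne) v hv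
    have hmem : freq.values ≠ [] → PySem.List.maxD freq.values (fun v => v) 0 ∈ freq.values :=
      fun hne => PySem.List.max?_mem (PySem.List.max?_eq_some_maxD freq.values (fun v => v) 0 hne)
    have hmx0 : freq.values = [] → PySem.List.maxD freq.values (fun v => v) 0 = 0 := by
      intro h; unfold PySem.List.maxD; rw [h]; rfl
    have hcle : c ≤ PySem.List.maxD freq.values (fun v => v) 0 ∨ c = 0 := by
      rcases getD_zero_or_mem_values freq x with h | h
      · right; rw [hc, h]
      · left; rw [hc]; exact hub _ h
    have hallle : PySem.List.maxD freq.values (fun v => v) 0 ≤ m → ∀ k, freq.getD k 0 ≤ m := by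
      intro hle k
      rcases getD_zero_or_mem_values freq k with h | h
      · rw [h]; exact le_of_lt hm
      · exact le_trans (hub _ h) hle
    rcases lt_trichotomy (PySem.List.maxD freq.values (fun v => v) 0) m with hlt | heq | hgt
    · -- max < m : both break without recording
      have hcm : ¬ m < c := by rcases hcle with h | h <;> omega
      have hnotpos : ¬ 0 < atMin := by
        rw [ha]
        intro hpos
        rcases (numEq_pos_iff m freq).1 hpos with ⟨k, hk, hkm⟩
        have : m ∈ freq.values := by
          rw [PySem.Dict.values_eq_map_keys freq hnd 0]
          exact List.mem_map.2 ⟨k, hk, hkm⟩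
        have := hub _ this
        omega
      rw [hstepA, hstepB, if_neg (by omega), if_pos hlt, if_neg hcm]
      refine ⟨by simp [hnotpos], ?_⟩
      rintro s hs
      cases hs
      exact ⟨hnd, ha, hallle (le_of_lt hlt)⟩
    · -- max = m : both break and record
      have hcm : ¬ m < c := by
        rcases hcle with h | h <;> omega
      have hpos : 0 < atMin := by
        have hne : freq.values ≠ [] := by
          intro h; have := hmx0 h; omega
        rcases mem_values_getD freq hnd (hmem hne) with ⟨k, hk, hkv⟩
        rw [ha]
        exact (numEq_pos_iff m freq).2 ⟨k, hk, by omega⟩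
      rw [hstepA, hstepB, if_pos heq, if_neg hcm]
      refine ⟨by simp [hpos], ?_⟩
      rintro s hs
      cases hs
      exact ⟨hnd, ha, hallle (le_of_eq heq)⟩
    · -- max > m : both remove the leftmost element and loop
      have hne : freq.values ≠ [] := by
        intro h; have := hmx0 h; omega
      have hcm : m < c := by
        rcases mem_values_getD freq hnd (hmem hne) with ⟨k, hk, hkv⟩
        have hkx : k = x := by
          by_contra hkx
          have := hko k hkx
          omega
        subst hkx
        omega
      have h1 : ¬ (PySem.List.maxD freq.values (fun v => v) 0 = m) := by omega
      have h2 : ¬ (PySem.List.maxD freq.values (fun v => v) 0 < m) := by omega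
      rcases hget : PySem.List.pyGet? xs l with _ | y
      · have hA : aInner xs m r (fuel+1) freq l maxLen = none := by
          simp only [aInner, h1, h2, if_false, hget]
        have hB : bInner xs m x (fuel+1) freq atMin l c = none := by
          simp only [bInner, hcm, if_true, hget]
        rw [hA, hB]
        exact ⟨rfl, by rintro s hs; cases hs⟩
      · have hmod : freq.modify y 0 (· - 1) = freq.insert y (freq.getD y 0 - 1) := rfl
        have hmodget : (freq.modify y 0 (· - 1)).getD y 0 = freq.getD y 0 - 1 := by
          rw [hmod]; exact PySem.Dict.getD_insert_self freq y _ 0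
        have hsame :
            (if (freq.modify y 0 (· - 1)).getD y 0 = 0
             then (freq.modify y 0 (· - 1)).erase y else (freq.modify y 0 (· - 1)))
            = (if freq.getD y 0 - 1 = 0 then freq.erase y
               else freq.insert y (freq.getD y 0 - 1)) := by
          rw [hmodget, hmod]
          split_ifs with h
          · exact dict_erase_insert_self freq y _
          · rfl
        have hA : aInner xs m r (fuel+1) freq l maxLen
            = aInner xs m r fuel
                (if freq.getD y 0 - 1 = 0 then freq.erase y
                 else freq.insert y (freq.getD y 0 - 1)) (l + 1) maxLen := by
          rw [← hsame]
          simp only [aInner, h1, h2, if_false, hget]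
        have hB : bInner xs m x (fuel+1) freq atMin l c
            = bInner xs m x fuel
                (if freq.getD y 0 - 1 = 0 then freq.erase y
                 else freq.insert y (freq.getD y 0 - 1))
                (if freq.getD y 0 - 1 = m then atMin + 1
                 else if freq.getD y 0 - 1 = m - 1 then atMin - 1 else atMin)
                (l + 1)
                ((if freq.getD y 0 - 1 = 0 then freq.erase y
                  else freq.insert y (freq.getD y 0 - 1)).getD x 0) := by
          simp only [bInner, hcm, if_true, hget]
        rw [hA, hB]
        set d0 := freq.getD y 0 - 1 with hd0
        set cnt1 := if d0 = 0 then freq.erase y else freq.insert y d0 with hcnt1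
        have hnd1 : cnt1.keys.Nodup := by
          rw [hcnt1]; split_ifs
          · exact dict_nodup_keys_erase freq y hnd
          · exact PySem.Dict.nodup_keys_insert freq y d0 hnd
        have hgd : ∀ k', k' ≠ y → cnt1.getD k' 0 = freq.getD k' 0 := by
          intro k' hk'
          rw [hcnt1]; split_ifs
          · rw [dict_getD_erase freq y k', if_neg hk']
          · exact PySem.Dict.getD_insert_of_ne freq d0 0 hk'
        have hgy : cnt1.getD y 0 = if d0 = 0 then 0 else d0 := by
          rw [hcnt1]; split_ifs with h
          · rw [dict_getD_erase freq y y, if_pos rfl]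
          · exact PySem.Dict.getD_insert_self freq y d0 0
        have ha1 : (if d0 = m then atMin + 1 else if d0 = m - 1 then atMin - 1 else atMin)
            = numEq m cnt1 := by
          rw [hcnt1]
          split_ifs with h1' h2' h3' h4' h5' <;>
            first
            | (rw [numEq_erase m (by omega) freq hnd y]; rw [ha]; split_ifs <;> omega)
            | (rw [numEq_insert m (by omega) freq hnd y d0]; rw [ha]; split_ifs <;> omega)
        have hko1 : ∀ k', k' ≠ x → cnt1.getD k' 0 ≤ m := by
          intro k' hk'
          by_cases hky : k' = y
          · subst hky
            rw [hgy]
            have := hko k' hk'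
            split_ifs <;> omega
          · rw [hgd k' hky]; exact hko k' hk'
        exact ih cnt1 (l + 1) maxLen
          (if d0 = m then atMin + 1 else if d0 = m - 1 then atMin - 1 else atMin)
          (cnt1.getD x 0) hnd1 ha1 rfl hko1

-- relation between the two outer-loop states
def pvRel (m : Int) (sa : Option (PySem.Dict Int Int × Int × Int))
    (sb : Option (PySem.Dict Int Int × Int × Int × Int)) : Prop :=
  (sa = none ∧ sb = none) ∨
  (∃ freq l maxLen atMin, sa = some (freq, l, maxLen) ∧ sb = some (freq, atMin, maxLen, l) ∧
    atMin = numEq m freq ∧ freq.keys.Nodup ∧ (∀ k, freq.getD k 0 ≤ m))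

theorem step_lockstep (xs : List Int) (m : Int) (hm : 0 < m) (r : Int)
    (freq : PySem.Dict Int Int) (l maxLen atMin : Int)
    (hnd : freq.keys.Nodup) (ha : atMin = numEq m freq)
    (hall : ∀ k, freq.getD k 0 ≤ m) :
    pvRel m
      (match PySem.List.pyGet? xs r with
       | none => none
       | some u => aInner xs m r (r.toNat + 2) (freq.modify u 0 (· + 1)) l maxLen)
      (match PySem.List.pyGet? xs r with
       | none => none
       | some x =>
         let c := freq.getD x 0 + 1
         let cnt1 := freq.insert x c
         let atMin1 := if c = m then atMin + 1
                       else if c = m + 1 then atMin - 1 else atMin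
         match bInner xs m x (r.toNat + 2) cnt1 atMin1 l c with
         | none => none
         | some (cnt2, atMin2, l2, _) =>
           some (cnt2, atMin2, if 0 < atMin2 then max maxLen (r - l2 + 1) else maxLen, l2)) := by
  rcases hu : PySem.List.pyGet? xs r with _ | u
  · exact Or.inl ⟨rfl, rfl⟩
  · simp only
    have hmod : freq.modify u 0 (· + 1) = freq.insert u (freq.getD u 0 + 1) := rfl
    have hnd1 : (freq.insert u (freq.getD u 0 + 1)).keys.Nodup :=
      PySem.Dict.nodup_keys_insert freq u _ hnd
    have ha1 : (if freq.getD u 0 + 1 = m then atMin + 1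
        else if freq.getD u 0 + 1 = m + 1 then atMin - 1 else atMin)
        = numEq m (freq.insert u (freq.getD u 0 + 1)) := by
      rw [numEq_insert m (by omega) freq hnd u (freq.getD u 0 + 1), ha]
      split_ifs <;> omega
    have hc1 : freq.getD u 0 + 1 = (freq.insert u (freq.getD u 0 + 1)).getD u 0 :=
      (PySem.Dict.getD_insert_self freq u _ 0).symm
    have hko1 : ∀ k, k ≠ u → (freq.insert u (freq.getD u 0 + 1)).getD k 0 ≤ m := by
      intro k hk
      rw [PySem.Dict.getD_insert_of_ne freq _ 0 hk]
      exact hall k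
    have hIH := inner_lockstep xs m u r hm (r.toNat + 2)
      (freq.insert u (freq.getD u 0 + 1)) l maxLen
      (if freq.getD u 0 + 1 = m then atMin + 1
       else if freq.getD u 0 + 1 = m + 1 then atMin - 1 else atMin)
      (freq.getD u 0 + 1) hnd1 ha1 hc1 hko1
    rcases hb : bInner xs m u (r.toNat + 2) (freq.insert u (freq.getD u 0 + 1))
        (if freq.getD u 0 + 1 = m then atMin + 1
         else if freq.getD u 0 + 1 = m + 1 then atMin - 1 else atMin)
        l (freq.getD u 0 + 1) with _ | s
    · left
      constructor
      · rw [hmod, hIH.1, hb]; rfl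
      · rfl
    · rcases s with ⟨cnt2, atMin2, l2, c2⟩
      right
      refine ⟨cnt2, l2, if 0 < atMin2 then max maxLen (r - l2 + 1) else maxLen, atMin2, ?_, ?_, ?_, ?_, ?_⟩
      · rw [hmod, hIH.1, hb]; rfl
      · rfl
      · exact (hIH.2 _ hb).2.1
      · exact (hIH.2 _ hb).1
      · exact (hIH.2 _ hb).2.2

theorem fold_lockstep (xs : List Int) (m : Int) (hm : 0 < m) :
    ∀ (rs : List Int) (sa : Option (PySem.Dict Int Int × Int × Int))
      (sb : Option (PySem.Dict Int Int × Int × Int × Int)),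
    pvRel m sa sb →
    pvRel m
      (rs.foldl
        (fun st r =>
          match st with
          | none => none
          | some (freq, l, maxLen) =>
            match PySem.List.pyGet? xs r with
            | none => none
            | some u => aInner xs m r (r.toNat + 2) (freq.modify u 0 (· + 1)) l maxLen) sa)
      (rs.foldl
        (fun st r =>
          match st with
          | none => none
          | some (cnt, atMin, best, l) =>
            match PySem.List.pyGet? xs r with
            | none => none
            | some x =>
              let c := cnt.getD x 0 + 1
              let cnt1 := cnt.insert x c
              let atMin1 := if c = m then atMin + 1
                            else if c = m + 1 then atMin - 1 else atMin
              match bInner xs m x (r.toNat + 2) cnt1 atMin1 l c with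
              | none => none
              | some (cnt2, atMin2, l2, _) =>
                some (cnt2, atMin2, if 0 < atMin2 then max best (r - l2 + 1) else best, l2)) sb) := by
  intro rs
  induction rs with
  | nil => intro sa sb h; exact h
  | cons r rs ih =>
    intro sa sb h
    rw [List.foldl_cons, List.foldl_cons]
    apply ih
    rcases h with ⟨h1, h2⟩ | ⟨freq, l, maxLen, atMin, h1, h2, h3, h4, h5⟩
    · subst h1; subst h2
      exact Or.inl ⟨rfl, rfl⟩
    · subst h1; subst h2
      exact step_lockstep xs m hm r freq l maxLen atMin h4 h3 h5

theorem outer_lockstep (xs : List Int) (m : Int) (hm : 0 < m) :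
    pvRel m (aOuter xs m) (bOuter xs m) := by
  unfold aOuter bOuter
  apply fold_lockstep xs m hm
  right
  refine ⟨PySem.Dict.empty, 0, 0, 0, rfl, rfl, rfl, PySem.Dict.nodup_keys_empty, ?_⟩
  intro k
  have : (PySem.Dict.empty : PySem.Dict Int Int).getD k 0 = 0 := rfl
  omega

-- proof-only wrappers for the final match of each port
def aFinish (xs : List Int) (mo : Option Int) : Int :=
  match mo with
  | none => 0
  | some minFreq =>
    match aOuter xs minFreq with
    | none => 0
    | some (_, _, maxLen) => maxLen

def bFinish (xs : List Int) (mo : Option Int) : Int :=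
  match mo with
  | none => 0
  | some minFreq =>
    match bOuter xs minFreq with
    | none => 0
    | some (_, _, best, _) => best

theorem finish_eq (xs : List Int) (mo : Option Int) (h : ∀ m, mo = some m → 0 < m) :
    aFinish xs mo = bFinish xs mo := by
  cases mo with
  | none => rfl
  | some m =>
    have hm : 0 < m := h m rfl
    simp only [aFinish, bFinish]
    rcases outer_lockstep xs m hm with ⟨h1, h2⟩ | ⟨freq, l, maxLen, atMin, h1, h2, _, _, _⟩
    · rw [h1, h2]
    · rw [h1, h2]

-- ===== VERDICT (by name: the statement is the Claim_ definition above) =====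
theorem findConsistentLogs_spec : Claim_equal_findConsistentLogs := by
  intro userEvent _ hpre
  unfold Pre_findConsistentLogs at hpre
  unfold Spec_findConsistentLogs
  show aFinish userEvent
      (PySem.List.min?
        ((userEvent.foldl (fun d u => d.modify u 0 (· + 1)) PySem.Dict.empty)).values
        (fun v => v))
    = bFinish userEvent
      (PySem.List.min?
        ((userEvent.foldl (fun d u => d.modify u 0 (· + 1)) PySem.Dict.empty)).values
        (fun v => v))
  apply finish_eq
  intro m hmo
  have hmc : PySem.List.min? (PySem.Dict.counter userEvent).values (fun v => v) = some m := hmo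
  have hmem : m ∈ (PySem.Dict.counter userEvent).values := PySem.List.min?_mem hmc
  rcases mem_values_getD _ (PySem.Dict.nodup_keys_counter userEvent) hmem with ⟨k, hk, hkv⟩
  rw [PySem.Dict.keys_counter] at hk
  have hkx : k ∈ userEvent := (PySem.Set.mem_ofList userEvent k).1 hk
  rw [PySem.Dict.getD_counter] at hkv
  have : 0 < userEvent.count k := List.count_pos_iff.2 hkx
  omega
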